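-- pv_equiv track=rewrite | github.com/agilebydesign/agile_bots | src/scanners/domain_scanner_base.py | _find_domain_concepts_in_text
-- ===== SOURCE A (Python) =====
-- from typing import List, Dict, Any, Optional, Set, TYPE_CHECKING
--
-- def _find_domain_concepts_in_text(
--
--     text: str,
--     domain_concepts: List[Dict[str, Any]]
-- ) -> Set[str]:
--     """Find which domain concepts are mentioned in text."""
--     found = set()
--     text_lower = text.lower()
--
--     for concept in domain_concepts:
--         concept_name = concept.get('name', '').lower()
--         if not concept_name:
--             continue
--
--         # Check if concept name appears in text
--         if concept_name in text_lower:
--             found.add(concept_name)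
--         # Also check plural
--         if concept_name + 's' in text_lower:
--             found.add(concept_name)
--
--     return found
-- ===== SOURCE B (Python) =====
-- def _find_domain_concepts_in_text(text, domain_concepts):
--     """Window-index variant: dedup the names, scan the text once per distinct
--     name length collecting all windows of that length into a hash set, then
--     decide each name by one set lookup (the redundant plural check is dropped:
--     name+'s' in text implies name in text)."""
--     tl = text.lower()
--     n = len(tl)
--     names = list(dict.fromkeys(
--         nm for concept in domain_concepts
--         for nm in (concept.get('name', '').lower(),) if nm))
--     lengths = dict.fromkeys(len(nm) for nm in names)
--     windows = {L: {tl[i:i + L] for i in range(n - L + 1)} for L in lengths}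
--     return {nm for nm in names if nm in windows[len(nm)]}
-- ===== Notes on version B (the rewrite author's own statement) =====
-- stated objective: alternative
-- what changed: Instead of substring-scanning the whole text twice per concept (name and name+'s'), B dedups the lowered names, drops the provably redundant plural scan (name+'s' in t implies name in t), and builds one hash set of all text windows per distinct name length so each name is decided by a single set lookup instead of a text scan.
import Mathlib
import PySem

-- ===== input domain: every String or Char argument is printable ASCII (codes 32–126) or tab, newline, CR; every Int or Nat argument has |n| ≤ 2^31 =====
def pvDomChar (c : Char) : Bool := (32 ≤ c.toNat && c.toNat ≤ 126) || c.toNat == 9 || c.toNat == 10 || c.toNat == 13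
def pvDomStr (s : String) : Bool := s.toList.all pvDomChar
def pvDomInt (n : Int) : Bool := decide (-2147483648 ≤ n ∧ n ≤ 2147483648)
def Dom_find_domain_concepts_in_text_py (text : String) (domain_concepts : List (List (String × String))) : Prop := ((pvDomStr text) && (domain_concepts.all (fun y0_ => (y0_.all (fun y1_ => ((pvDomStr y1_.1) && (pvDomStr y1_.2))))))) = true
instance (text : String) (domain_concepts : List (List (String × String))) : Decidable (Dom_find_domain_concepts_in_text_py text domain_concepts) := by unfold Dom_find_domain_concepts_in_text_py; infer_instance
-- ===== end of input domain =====

-- B dedups the names, builds a hash set of all text windows once per distinct name length, and decides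
-- each name by one set lookup; the plural check is dropped as redundant (name+'s' in t implies name in t).

-- ===== PORT A =====
def find_domain_concepts_in_text_py (text : String) (domain_concepts : List (List (String × String))) : List String :=
  let text_lower := PySem.Str.lower text
  domain_concepts.foldl (fun found concept =>
    let concept_name := PySem.Str.lower (PySem.Dict.getD (PySem.Dict.mk concept) "name" "")
    if concept_name == "" then found
    else
      let found1 := if PySem.Str.isIn concept_name text_lower then PySem.Set.add found concept_name else found
      if PySem.Str.isIn (concept_name ++ "s") text_lower then PySem.Set.add found1 concept_name else found1)
    PySem.Set.empty

-- ===== PORT B =====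
def pvName (concept : List (String × String)) : String :=
  PySem.Str.lower (PySem.Dict.getD (PySem.Dict.mk concept) "name" "")

def pvWindows (tl : List Char) (L : Nat) : PySem.Set (List Char) :=
  PySem.Set.ofList ((PySem.List.pyRange 0 ((tl.length : Int) - (L : Int) + 1) 1).map
    (fun i => PySem.List.slice tl (some i) (some (i + (L : Int)))))

def find_domain_concepts_in_text_py_alt (text : String) (domain_concepts : List (List (String × String))) : List String :=
  let tl := (PySem.Str.lower text).toList
  let names := PySem.List.dedup ((domain_concepts.map pvName).filter (fun nm => nm != ""))
  let lengths := PySem.List.dedup (names.map (fun nm => nm.toList.length))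
  let windows := lengths.foldl (fun d L => d.insert L (pvWindows tl L))
    (PySem.Dict.empty : PySem.Dict Nat (PySem.Set (List Char)))
  PySem.Set.ofList (names.filter
    (fun nm => PySem.Set.contains (windows.getD nm.toList.length PySem.Set.empty) nm.toList))

-- ===== PRECONDITION & SPEC =====
def Spec_find_domain_concepts_in_text_py (text : String) (domain_concepts : List (List (String × String))) (out : List String) : Prop := out = find_domain_concepts_in_text_py_alt text domain_concepts
instance (text : String) (domain_concepts : List (List (String × String))) (out : List String) : Decidable (Spec_find_domain_concepts_in_text_py text domain_concepts out) := by unfold Spec_find_domain_concepts_in_text_py; infer_instance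

-- ===== CLAIM (what is proved, stated in full; the proofs are below) =====
def Claim_equal_find_domain_concepts_in_text_py : Prop := ∀ (text : String) (domain_concepts : List (List (String × String))), Dom_find_domain_concepts_in_text_py text domain_concepts → Spec_find_domain_concepts_in_text_py text domain_concepts (find_domain_concepts_in_text_py text domain_concepts)

-- ===== LEMMAS AND PROOFS =====

-- name+'s' occurring in t implies name occurring in t (why A's plural branch never adds anything new)
lemma pv_plural_isIn (sub s : String) (h : PySem.Str.isIn (sub ++ "s") s = true) :
    PySem.Str.isIn sub s = true := by
  rw [PySem.Str.isIn_iff_infix] at h ⊢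
  have hp : sub.toList <+: (sub ++ "s").toList := by
    simp [List.prefix_append]
  exact hp.isInfix.trans h

-- A's two conditional adds per concept collapse to one conditional add
lemma pv_step (tl : String) (s : PySem.Set String) (nm : String) :
    (if nm == "" then s
     else
       let found1 := if PySem.Str.isIn nm tl then PySem.Set.add s nm else s
       if PySem.Str.isIn (nm ++ "s") tl then PySem.Set.add found1 nm else found1) =
    (if (nm != "") && PySem.Str.isIn nm tl then PySem.Set.add s nm else s) := by
  by_cases h0 : nm = ""
  · subst h0; simp
  · have h0' : (nm == "") = false := by simp [h0]
    have h0b : (nm != "") = true := by simp [h0]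
    cases h1 : PySem.Str.isIn nm tl with
    | true =>
      simp only [h0', Bool.false_eq_true, if_false, h1, h0b, Bool.true_and, if_true]
      have hmem : nm ∈ PySem.Set.add s nm := (PySem.Set.mem_add s nm nm).mpr (Or.inr rfl)
      split_ifs with h2
      · exact PySem.Set.add_of_mem hmem
      · rfl
    | false =>
      have h2 : PySem.Str.isIn (nm ++ "s") tl = false := by
        cases hc : PySem.Str.isIn (nm ++ "s") tl
        · rfl
        · exact absurd (pv_plural_isIn _ _ hc) (by rw [h1]; exact Bool.false_ne_true)
      simp only [h0', Bool.false_eq_true, if_false, h1, h2, h0b, Bool.true_and]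

-- A's fold is a single conditional-add fold over the lowered names
lemma pv_A_eq_fold (text : String) (dcs : List (List (String × String))) :
    find_domain_concepts_in_text_py text dcs =
      (dcs.map pvName).foldl
        (fun s nm => if (nm != "") && PySem.Str.isIn nm (PySem.Str.lower text) then PySem.Set.add s nm else s)
        PySem.Set.empty := by
  unfold find_domain_concepts_in_text_py
  dsimp only
  rw [List.foldl_map]
  congr 1
  funext s c
  exact pv_step (PySem.Str.lower text) s (pvName c)

-- the windows dict looks up exactly pvWindows for every length it was built from
lemma pv_windows_getD (tl : List Char) :
    ∀ (ls : List Nat) (d : PySem.Dict Nat (PySem.Set (List Char))) (L : Nat),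
      (L ∈ ls ∨ d.getD L PySem.Set.empty = pvWindows tl L) →
      (ls.foldl (fun d L => d.insert L (pvWindows tl L)) d).getD L PySem.Set.empty = pvWindows tl L := by
  intro ls
  induction ls with
  | nil => intro d L h; simpa using h.resolve_left (by simp)
  | cons a ls ih =>
    intro d L h
    simp only [List.foldl_cons]
    apply ih
    by_cases hL : L = a
    · right; subst hL; simp
    · rcases h with h | h
      · rcases List.mem_cons.mp h with h' | h'
        · exact absurd h' hL
        · exact Or.inl h'
      · right
        rw [PySem.Dict.getD_insert]
        simp only [if_neg hL]
        exact h

-- a nonempty pattern is a member of the window set of its length iff it occurs in the text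
lemma pv_mem_windows (tl cs : List Char) (hne : cs ≠ []) :
    PySem.Set.contains (pvWindows tl cs.length) cs = PySem.Chars.isIn cs tl := by
  rw [Bool.eq_iff_iff]
  rw [← PySem.Chars.exists_prefix_drop_iff_isIn]
  rw [PySem.Set.contains_iff]
  unfold pvWindows
  rw [PySem.Set.mem_ofList]
  constructor
  · intro h
    rcases List.mem_map.mp h with ⟨i, hi, hslice⟩
    rcases (PySem.List.mem_pyRange_one).mp hi with ⟨h0, _⟩
    obtain ⟨j, rfl⟩ := Int.eq_ofNat_of_zero_le h0
    rw [PySem.List.slice_natCast_add] at hslice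
    exact ⟨j, hslice ▸ List.take_prefix _ _⟩
  · rintro ⟨j, hpre⟩
    have hlen : cs.length ≤ (tl.drop j).length := hpre.length_le
    have hjl : j + cs.length ≤ tl.length := by
      simp at hlen
      have : 1 ≤ cs.length := Nat.one_le_iff_ne_zero.mpr (by simpa using hne)
      omega
    refine List.mem_map.mpr ⟨(j : Int), ?_, ?_⟩
    · rw [PySem.List.mem_pyRange_one]
      constructor
      · exact_mod_cast Int.natCast_nonneg j
      · omega
    · rw [PySem.List.slice_natCast_add]
      exact (List.prefix_iff_eq_take.mp hpre).symm

-- folding Set.add over a filtered list = one conditional-add fold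
lemma pv_fold_filter_add (l : List String) :
    ∀ (s : PySem.Set String) (p : String → Bool),
      (l.filter p).foldl PySem.Set.add s = l.foldl (fun s nm => if p nm then PySem.Set.add s nm else s) s := by
  induction l with
  | nil => intro s p; rfl
  | cons a l ih =>
    intro s p
    by_cases hp : p a
    · simp [hp, ih]
    · simp [hp, ih]

-- filtering a set commutes with Set.add
lemma pv_filter_add (s : PySem.Set String) (nm : String) (q : String → Bool) :
    (PySem.Set.add s nm).filter q = if q nm then PySem.Set.add (s.filter q) nm else s.filter q := by
  rw [PySem.Set.add_eq_ite]
  by_cases hm : nm ∈ s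
  · by_cases hq : q nm
    · have : nm ∈ s.filter q := List.mem_filter.mpr ⟨hm, hq⟩
      simp [hm, hq]
    · simp [hm, hq]
  · by_cases hq : q nm
    · have : nm ∉ s.filter q := fun hc => hm (List.mem_filter.mp hc).1
      simp [hm, hq, List.filter_append]
    · simp [hm, hq, List.filter_append]
  
-- filtering the result of a conditional-add fold = folding with the conjoined condition
lemma pv_filter_fold (l : List String) :
    ∀ (s : PySem.Set String) (p q : String → Bool),
      (l.foldl (fun s nm => if p nm then PySem.Set.add s nm else s) s).filter q =
        l.foldl (fun s nm => if p nm && q nm then PySem.Set.add s nm else s) (s.filter q) := by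
  induction l with
  | nil => intro s p q; rfl
  | cons a l ih =>
    intro s p q
    simp only [List.foldl_cons]
    rw [ih]
    by_cases hp : p a
    · by_cases hq : q a
      · simp [hp, pv_filter_add, hq]
      · simp [hp, pv_filter_add, hq]
    · simp [hp]

-- ===== VERDICT (by name: the statement is the Claim_ definition above) =====
theorem find_domain_concepts_in_text_py_spec : Claim_equal_find_domain_concepts_in_text_py := by
  intro text dcs _
  show find_domain_concepts_in_text_py text dcs = find_domain_concepts_in_text_py_alt text dcs
  unfold find_domain_concepts_in_text_py_alt
  dsimp only
  set tl := (PySem.Str.lower text).toList with htl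
  set l := dcs.map pvName with hl
  set F := l.filter (fun nm => nm != "") with hF
  set names := PySem.List.dedup F with hnames
  set lengths := PySem.List.dedup (names.map (fun nm => nm.toList.length)) with hlengths
  set windows := lengths.foldl (fun d L => d.insert L (pvWindows tl L))
    (PySem.Dict.empty : PySem.Dict Nat (PySem.Set (List Char))) with hwin
  -- the window lookup agrees with the substring test on every name in `names`
  have hq : ∀ nm ∈ names,
      (PySem.Set.contains (windows.getD nm.toList.length PySem.Set.empty) nm.toList) =
        PySem.Str.isIn nm (PySem.Str.lower text) := by
    intro nm hnm
    have hne : nm ≠ "" := by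
      have : nm ∈ F := by rw [hnames] at hnm; exact (PySem.List.mem_dedup _ _).mp hnm
      have := (List.mem_filter.mp this).2
      simpa using this
    have hLmem : nm.toList.length ∈ lengths := by
      rw [hlengths]
      exact (PySem.List.mem_dedup _ _).mpr (List.mem_map.mpr ⟨nm, hnm, rfl⟩)
    rw [hwin, pv_windows_getD tl lengths _ _ (Or.inl hLmem)]
    have hcs : nm.toList ≠ [] := fun hc => hne (String.toList_eq_nil_iff.mp hc)
    rw [pv_mem_windows tl nm.toList hcs, PySem.Str.isIn_eq, htl]
  rw [List.filter_congr hq]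
  -- drop the outer ofList: the filtered dedup list has no duplicates
  have hnd : (names.filter (fun nm => PySem.Str.isIn nm (PySem.Str.lower text))).Nodup := by
    apply List.Nodup.filter
    rw [hnames]; exact PySem.List.nodup_dedup F
  rw [PySem.Set.ofList_eq_self_of_nodup _ hnd]
  -- both sides are the same single fold
  rw [pv_A_eq_fold, hnames, PySem.List.dedup_eq_ofList, PySem.Set.ofList_eq_foldl, hF,
    pv_fold_filter_add, pv_filter_fold]
  rfl
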